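-- pv_equiv track=rewrite | github.com/aws-samples/browser-control-with-nova-act | core/nodes/executor_node.py | get_current_task_batch
-- ===== SOURCE A (Python) =====
-- from typing import Dict, Any, List
--
-- def get_current_task_batch(remaining_tasks: List[Dict[str, Any]]) -> List[Dict[str, Any]]:
--     """Group tasks by sequence and return the current batch to execute"""
--     sequence_groups = {}
--     for task in remaining_tasks:
--         sequence = task.get("sequence", 1)
--         if sequence not in sequence_groups:
--             sequence_groups[sequence] = []
--         sequence_groups[sequence].append(task)
--
--     current_sequence = min(sequence_groups.keys())
--     return sequence_groups[current_sequence]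
-- ===== SOURCE B (Python) =====
-- from typing import Dict, Any, List
--
-- def get_current_task_batch(remaining_tasks: List[Dict[str, Any]]) -> List[Dict[str, Any]]:
--     """Single pass: keep the smallest sequence seen so far and its batch."""
--     best = None
--     batch = []
--     for task in remaining_tasks:
--         s = task.get("sequence", 1)
--         if best is None or s < best:
--             best = s
--             batch = [task]
--         elif s == best:
--             batch.append(task)
--     return batch
-- ===== Notes on version B (the rewrite author's own statement) =====
-- stated objective: simpler
-- what changed: B replaces A's build-a-dict-of-all-sequence-groups-then-take-min-of-keys with a single linear pass that maintains only the running minimum sequence and its batch; Pre_ excludes the empty list, on which A raises ValueError from min() on an empty key set.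
import Mathlib
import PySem

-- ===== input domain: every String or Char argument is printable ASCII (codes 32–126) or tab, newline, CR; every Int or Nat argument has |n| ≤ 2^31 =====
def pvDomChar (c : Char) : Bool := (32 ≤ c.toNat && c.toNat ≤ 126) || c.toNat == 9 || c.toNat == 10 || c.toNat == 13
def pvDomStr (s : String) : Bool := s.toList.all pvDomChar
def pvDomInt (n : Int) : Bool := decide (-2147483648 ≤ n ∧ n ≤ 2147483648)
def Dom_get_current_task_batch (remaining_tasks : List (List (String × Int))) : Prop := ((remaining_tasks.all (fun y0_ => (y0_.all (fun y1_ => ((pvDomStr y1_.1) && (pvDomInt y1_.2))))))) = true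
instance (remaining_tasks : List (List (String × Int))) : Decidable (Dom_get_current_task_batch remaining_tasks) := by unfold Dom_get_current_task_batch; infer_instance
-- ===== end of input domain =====

-- B replaces A's dict-of-all-groups-then-min-of-keys with a single pass keeping only the
-- running minimum sequence and its batch (objective: simpler; same O(n) time).

-- task.get("sequence", 1): first-match lookup in the association list, default 1 (shared by both ports)
def pvSeq (task : List (String × Int)) : Int :=
  ((task.find? (fun p => p.1 == "sequence")).map (·.2)).getD 1

-- ===== PORT A =====
def get_current_task_batch (remaining_tasks : List (List (String × Int))) : List (List (String × Int)) :=
  let groups := remaining_tasks.foldl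
    (fun (d : PySem.Dict Int (List (List (String × Int)))) task =>
      let s := pvSeq task
      -- if sequence not in sequence_groups: sequence_groups[sequence] = []
      let d1 := if d.contains s then d else d.insert s []
      -- sequence_groups[sequence].append(task)  (in-place append = overwrite at s)
      d1.insert s (d1.getD s [] ++ [task]))
    PySem.Dict.empty
  -- current_sequence = min(sequence_groups.keys()); ValueError on empty is excluded by Pre_
  match PySem.List.min? groups.keys (fun x => x) with
  | none => []
  | some m => groups.getD m []

-- ===== PORT B =====
def get_current_task_batch_alt (remaining_tasks : List (List (String × Int))) : List (List (String × Int)) :=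
  (remaining_tasks.foldl
    (fun (st : Option Int × List (List (String × Int))) task =>
      let s := pvSeq task
      match st.1 with
      | none => (some s, [task])
      | some m =>
        if s < m then (some s, [task])
        else if s = m then (some m, st.2 ++ [task])
        else st)
    (none, [])).2

-- ===== PRECONDITION & SPEC =====
-- A raises ValueError (min of an empty dict's keys) on the empty list; Pre_ excludes exactly that input
-- (B happens to return [] there, but nothing is claimed outside Pre_).
def Pre_get_current_task_batch (remaining_tasks : List (List (String × Int))) : Prop :=
  remaining_tasks ≠ []
instance (remaining_tasks : List (List (String × Int))) : Decidable (Pre_get_current_task_batch remaining_tasks) := by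
  unfold Pre_get_current_task_batch; infer_instance

def pvWitness_get_current_task_batch : (List (List (String × Int))) := [[("sequence", 2)], [("sequence", 1)]]

def Spec_get_current_task_batch (remaining_tasks : List (List (String × Int))) (out : List (List (String × Int))) : Prop := out = get_current_task_batch_alt remaining_tasks
instance (remaining_tasks : List (List (String × Int))) (out : List (List (String × Int))) : Decidable (Spec_get_current_task_batch remaining_tasks out) := by unfold Spec_get_current_task_batch; infer_instance

-- ===== CLAIM (what is proved, stated in full; the proofs are below) =====
def Claim_equal_get_current_task_batch : Prop := ∀ (remaining_tasks : List (List (String × Int))), Dom_get_current_task_batch remaining_tasks → Pre_get_current_task_batch remaining_tasks → Spec_get_current_task_batch remaining_tasks (get_current_task_batch remaining_tasks)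

-- ===== LEMMAS AND PROOFS =====

-- the two loop bodies, named for the proofs
def stepA (d : PySem.Dict Int (List (List (String × Int)))) (task : List (String × Int)) :
    PySem.Dict Int (List (List (String × Int))) :=
  let s := pvSeq task
  let d1 := if d.contains s then d else d.insert s []
  d1.insert s (d1.getD s [] ++ [task])

def stepB (st : Option Int × List (List (String × Int))) (task : List (String × Int)) :
    Option Int × List (List (String × Int)) :=
  let s := pvSeq task
  match st.1 with
  | none => (some s, [task])
  | some m =>
    if s < m then (some s, [task])
    else if s = m then (some m, st.2 ++ [task])
    else st

lemma min?_append_singleton (xs : List Int) (s : Int) :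
    PySem.List.min? (xs ++ [s]) (fun x => x) =
      some (match PySem.List.min? xs (fun x => x) with | none => s | some m => min m s) := by
  cases xs with
  | nil =>
    rw [show PySem.List.min? ([] : List Int) (fun x => x) = none from
      (PySem.List.min?_eq_none_iff _ _).mpr rfl]
    simp [PySem.List.min?_id_cons]
  | cons x t =>
    simp [PySem.List.min?_id_cons, List.foldl_append]

-- invariant: B's state is the running minimum of A's dict keys together with the group stored there
lemma loop_inv (ts : List (List (String × Int)))
    (d : PySem.Dict Int (List (List (String × Int))))
    (st : Option Int × List (List (String × Int)))
    (h1 : PySem.List.min? d.keys (fun x => x) = st.1)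
    (h2 : ∀ m, st.1 = some m → d.get? m = some st.2) :
    PySem.List.min? (ts.foldl stepA d).keys (fun x => x) = (ts.foldl stepB st).1 ∧
    (∀ m, (ts.foldl stepB st).1 = some m → (ts.foldl stepA d).get? m = some (ts.foldl stepB st).2) := by
  induction ts generalizing d st with
  | nil => exact ⟨h1, h2⟩
  | cons t ts ih =>
    simp only [List.foldl_cons]
    set s := pvSeq t with hs
    cases hst : st.1 with
    | none =>
      rw [hst] at h1
      have hk : d.keys = [] := (PySem.List.min?_eq_none_iff _ _).mp h1
      have hc : d.contains s = false := by
        by_contra h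
        have hmem := (PySem.Dict.contains_iff_mem_keys _ _).mp (by simpa using h)
        simp [hk] at hmem
      have hA : stepA d t = d.insert s [t] := by
        simp only [stepA, ← hs]
        rw [if_neg (by simp [hc]), PySem.Dict.insert_insert_self]
        rw [PySem.Dict.getD_insert_self]
        simp
      have hB : stepB st t = (some s, [t]) := by
        simp only [stepB, ← hs, hst]
      rw [hA, hB]
      apply ih
      · rw [PySem.Dict.keys_insert_of_not_contains _ _ hc, hk]
        simp [PySem.List.min?_id_cons]
      · intro m hm
        obtain rfl : s = m := by simpa using hm
        simp [PySem.Dict.get?_insert_self]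
    | some m =>
      rw [hst] at h1
      have hbatch : d.get? m = some st.2 := h2 m hst
      have hmin : ∀ y ∈ d.keys, m ≤ y := by
        intro y hy
        simpa using PySem.List.min?_isMin h1 y hy
      by_cases hlt : s < m
      · -- new strictly smaller sequence: fresh key, fresh batch
        have hc : d.contains s = false := by
          by_contra h
          have := hmin s ((PySem.Dict.contains_iff_mem_keys _ _).mp (by simpa using h))
          omega
        have hA : stepA d t = d.insert s [t] := by
          simp only [stepA, ← hs]
          rw [if_neg (by simp [hc]), PySem.Dict.insert_insert_self]
          rw [PySem.Dict.getD_insert_self]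
          simp
        have hB : stepB st t = (some s, [t]) := by
          simp only [stepB, ← hs, hst, if_pos hlt]
        rw [hA, hB]
        apply ih
        · rw [PySem.Dict.keys_insert_of_not_contains _ _ hc]
          rw [min?_append_singleton, h1]
          have hred : (match some m with | none => s | some m' => min m' s) = min m s := rfl
          rw [hred]
          congr 1
          omega
        · intro m' hm'
          obtain rfl : s = m' := by simpa using hm'
          simp [PySem.Dict.get?_insert_self]
      · by_cases heq : s = m
        · -- same sequence: append to the existing group / batch
          subst heq
          have hc : d.contains s = true :=
            (PySem.Dict.contains_iff_mem_keys _ _).mpr (PySem.List.min?_mem h1)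
          have hA : stepA d t = d.insert s (st.2 ++ [t]) := by
            simp only [stepA, ← hs]
            rw [if_pos hc, PySem.Dict.getD_of_get?_eq_some _ _ hbatch]
          have hB : stepB st t = (some s, st.2 ++ [t]) := by
            simp [stepB, ← hs, hst]
          rw [hA, hB]
          apply ih
          · rw [PySem.Dict.keys_insert_of_contains _ _ hc]
            exact h1
          · intro m' hm'
            obtain rfl : s = m' := by simpa using hm'
            simp [PySem.Dict.get?_insert_self]
        · -- larger sequence: B skips; A's dict grows at a key ≠ m, min and group at m unchanged
          have hgt : m < s := by omega
          have hne : m ≠ s := by omega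
          have hB : stepB st t = st := by
            simp only [stepB, ← hs, hst, if_neg hlt, if_neg heq]
          have hkeys : (stepA d t).keys = d.keys ∨ (stepA d t).keys = d.keys ++ [s] := by
            by_cases hc : d.contains s = true
            · left
              simp only [stepA, ← hs, if_pos hc]
              exact PySem.Dict.keys_insert_of_contains _ _ hc
            · right
              have hc' : d.contains s = false := by simpa using hc
              simp only [stepA, ← hs]
              rw [if_neg (by simp [hc']), PySem.Dict.insert_insert_self]
              exact PySem.Dict.keys_insert_of_not_contains _ _ hc'
          have hget : (stepA d t).get? m = d.get? m := by
            by_cases hc : d.contains s = true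
            · simp only [stepA, ← hs, if_pos hc]
              exact PySem.Dict.get?_insert_of_ne _ _ hne
            · have hc' : d.contains s = false := by simpa using hc
              simp only [stepA, ← hs]
              rw [if_neg (by simp [hc']), PySem.Dict.insert_insert_self]
              exact PySem.Dict.get?_insert_of_ne _ _ hne
          rw [hB]
          apply ih
          · rcases hkeys with h | h
            · rw [h, h1, hst]
            · rw [h, min?_append_singleton, h1, hst]
              have hred : (match some m with | none => s | some m' => min m' s) = min m s := rfl
              rw [hred]
              congr 1
              omega
          · intro m' hm'
            rw [hst] at hm'
            obtain rfl : m = m' := by simpa using hm'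
            rw [hget]
            exact hbatch

-- on a nonempty list B's final best-seq is some value (the fold starts producing 'some' at the first task)
lemma foldB_isSome (ts : List (List (String × Int))) (st : Option Int × List (List (String × Int)))
    (h : st.1.isSome) : ((ts.foldl stepB st).1).isSome := by
  induction ts generalizing st with
  | nil => exact h
  | cons t ts ih =>
    simp only [List.foldl_cons]
    apply ih
    obtain ⟨m, hm⟩ := Option.isSome_iff_exists.mp h
    simp only [stepB, hm]
    split_ifs <;> simp [hm]

-- ===== VERDICT (by name: the statement is the Claim_ definition above) =====
theorem get_current_task_batch_spec : Claim_equal_get_current_task_batch := by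
  intro ts _ hne
  unfold Spec_get_current_task_batch
  have eA : get_current_task_batch ts =
      (match PySem.List.min? (ts.foldl stepA PySem.Dict.empty).keys (fun x => x) with
       | none => []
       | some m => (ts.foldl stepA PySem.Dict.empty).getD m []) := rfl
  have eB : get_current_task_batch_alt ts = (ts.foldl stepB (none, [])).2 := rfl
  rw [eA, eB]
  obtain ⟨h1, h2⟩ := loop_inv ts PySem.Dict.empty (none, [])
    (by rw [PySem.Dict.keys_empty]; exact (PySem.List.min?_eq_none_iff _ _).mpr rfl)
    (by simp)
  rw [h1]
  cases hfin : (ts.foldl stepB (none, [])).1 with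
  | none =>
    -- impossible on a nonempty list
    obtain ⟨t, ts', rfl⟩ := List.exists_cons_of_ne_nil hne
    have : ((ts'.foldl stepB (stepB (none, []) t)).1).isSome := by
      apply foldB_isSome
      simp only [stepB]
      rfl
    rw [List.foldl_cons] at hfin
    rw [hfin] at this
    simp at this
  | some m =>
    show (ts.foldl stepA PySem.Dict.empty).getD m [] = (ts.foldl stepB (none, [])).2
    exact PySem.Dict.getD_of_get?_eq_some _ _ (h2 m hfin)
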